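-- pv_equiv track=rewrite | github.com/raja1106/Leetcode | string/151. Reverse Words in a String.py | _clean_spaces
-- ===== SOURCE A (Python) =====
-- def _clean_spaces(arr):
--     n = len(arr)
--     i = j = 0
--
--     while j < n:
--         # Skip spaces
--         while j < n and arr[j] == ' ':
--             j += 1
--         # Copy non-space characters
--         while j < n and arr[j] != ' ':
--             arr[i] = arr[j]
--             i += 1
--             j += 1
--         # Skip spaces to reach the next word, add only one space if there's a next word
--         while j < n and arr[j] == ' ':
--             j += 1
--         if j < n:
--             arr[i] = ' '
--             i += 1
--
--     return ''.join(arr[:i])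
-- ===== SOURCE B (Python) =====
-- def _clean_spaces(arr):
--     # Single forward pass at the word level: accumulate maximal runs of
--     # non-' ' elements as words, then join with single spaces.
--     # Note: unlike A, B does not mutate arr in place; equivalence is about the
--     # return value only.
--     words = []
--     cur = None
--     for x in arr:
--         if x == ' ':
--             if cur is not None:
--                 words.append(cur)
--                 cur = None
--         else:
--             cur = x if cur is None else cur + x
--     if cur is not None:
--         words.append(cur)
--     return ' '.join(words)
-- ===== Notes on version B (the rewrite author's own statement) =====
-- stated objective: simpler
-- what changed: Replaces A's in-place two-pointer compaction (three nested index-driven while loops writing characters back into arr) by a single word-level forward pass that accumulates maximal runs of non-' ' elements as words and returns ' '.join(words); B does not mutate arr (the return value is identical).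
import Mathlib
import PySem

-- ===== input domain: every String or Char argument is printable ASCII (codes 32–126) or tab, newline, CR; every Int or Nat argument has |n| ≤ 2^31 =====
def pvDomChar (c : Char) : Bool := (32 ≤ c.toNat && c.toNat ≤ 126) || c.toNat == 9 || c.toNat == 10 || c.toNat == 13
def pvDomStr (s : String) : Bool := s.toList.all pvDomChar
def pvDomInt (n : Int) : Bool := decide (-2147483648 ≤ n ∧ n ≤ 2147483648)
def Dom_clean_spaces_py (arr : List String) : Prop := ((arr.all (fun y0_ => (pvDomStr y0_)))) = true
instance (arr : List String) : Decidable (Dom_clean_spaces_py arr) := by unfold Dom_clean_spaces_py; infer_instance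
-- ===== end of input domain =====

-- B replaces A's in-place two-pointer compaction by a single word-level pass
-- (accumulate runs of non-' ' elements, then ' '.join); simpler. A mutates arr
-- in place, B does not: the equivalence proved here is about the return value only.

-- ===== PORT A =====
-- cited by the decreasing_by of the loop ports (keeps the embedded termination proofs small)
theorem pv_dec {n j : Nat} (h : j < n) : n - (j + 1) < n - j := by omega
theorem pv_dec2 {a b n : Nat} (h1 : b < a) (h2 : b < n) : n - a < n - b := by omega

-- inner while loop "while j < n and arr[j] == ' ': j += 1"
def pvSkip (arr : List String) (n j : Nat) : Nat :=
  if _h : j < n ∧ arr.getD j "" = " " then pvSkip arr n (j + 1) else j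
termination_by n - j
decreasing_by exact pv_dec _h.1

-- inner while loop "while j < n and arr[j] != ' ': arr[i] = arr[j]; i += 1; j += 1"
def pvCopy (arr : List String) (n i j : Nat) : List String × Nat × Nat :=
  if _h : j < n ∧ ¬ arr.getD j "" = " " then
    pvCopy (arr.set i (arr.getD j "")) n (i + 1) (j + 1)
  else (arr, i, j)
termination_by n - j
decreasing_by exact pv_dec _h.1

-- the next three lemmas are cited by pvOuter's decreasing_by (termination of the outer while)
theorem pvSkip_ge (arr : List String) (n j : Nat) : j ≤ pvSkip arr n j := by
  fun_induction pvSkip arr n j with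
  | case1 j h ih => omega
  | case2 j h => omega

theorem pvCopy_ge (arr : List String) (n i j : Nat) : j ≤ (pvCopy arr n i j).2.2 := by
  fun_induction pvCopy arr n i j with
  | case1 arr i j h ih => omega
  | case2 i j h => simp

theorem pvOuter_dec (arr : List String) (n i j : Nat) (h : j < n) :
    j < pvSkip (pvCopy arr n i (pvSkip arr n j)).1 n (pvCopy arr n i (pvSkip arr n j)).2.2 := by
  by_cases hsp : arr.getD j "" = " "
  · have h1 : pvSkip arr n j = pvSkip arr n (j + 1) := by
      simp only [List.getD] at hsp; rw [pvSkip]; simp [List.getD, h, hsp]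
    have h2 : j + 1 ≤ pvSkip arr n j := h1 ▸ pvSkip_ge arr n (j + 1)
    have h3 := pvCopy_ge arr n i (pvSkip arr n j)
    have h4 := pvSkip_ge (pvCopy arr n i (pvSkip arr n j)).1 n (pvCopy arr n i (pvSkip arr n j)).2.2
    omega
  · have h1 : pvSkip arr n j = j := by
      simp only [List.getD] at hsp; rw [pvSkip]; simp [List.getD, hsp]
    have h2 : pvCopy arr n i j = pvCopy (arr.set i (arr.getD j "")) n (i + 1) (j + 1) := by
      simp only [List.getD] at hsp; rw [pvCopy]; simp [List.getD, h, hsp]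
    have h3 : j + 1 ≤ (pvCopy arr n i j).2.2 := by
      rw [h2]; exact pvCopy_ge _ n (i + 1) (j + 1)
    have h4 := pvSkip_ge (pvCopy arr n i (pvSkip arr n j)).1 n (pvCopy arr n i (pvSkip arr n j)).2.2
    rw [h1] at *
    omega

-- outer while loop "while j < n: …"
def pvOuter (arr : List String) (n i j : Nat) : List String × Nat :=
  if h : j < n then -- h cited by decreasing_by
    let j1 := pvSkip arr n j
    let s := pvCopy arr n i j1
    let j2 := pvSkip s.1 n s.2.2
    if j2 < n then pvOuter (s.1.set s.2.1 " ") n (s.2.1 + 1) j2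
    else pvOuter s.1 n s.2.1 j2
  else (arr, i)
termination_by n - j
decreasing_by
  · exact pv_dec2 (pvOuter_dec arr n i j h) h
  · exact pv_dec2 (pvOuter_dec arr n i j h) h

def clean_spaces_py (arr : List String) : String :=
  let n := arr.length
  let r := pvOuter arr n 0 0
  PySem.Str.join "" (r.1.take r.2)

-- ===== PORT B =====
-- "for x in arr: …" accumulating (words, cur)
def pvAltLoop : List String → List String → Option String → List String
  | [], words, none => words
  | [], words, some c => words ++ [c]
  | x :: rest, words, cur =>
    if x = " " then
      match cur with
      | none => pvAltLoop rest words none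
      | some c => pvAltLoop rest (words ++ [c]) none
    else
      pvAltLoop rest words (some (match cur with | none => x | some c => c ++ x))

def clean_spaces_py_alt (arr : List String) : String :=
  PySem.Str.join " " (pvAltLoop arr [] none)

-- ===== PRECONDITION & SPEC =====
def Spec_clean_spaces_py (arr : List String) (out : String) : Prop := out = clean_spaces_py_alt arr
instance (arr : List String) (out : String) : Decidable (Spec_clean_spaces_py arr out) := by unfold Spec_clean_spaces_py; infer_instance

-- ===== CLAIM (what is proved, stated in full; the proofs are below) =====
def Claim_equal_clean_spaces_py : Prop := ∀ (arr : List String), Dom_clean_spaces_py arr → Spec_clean_spaces_py arr (clean_spaces_py arr)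

-- ===== LEMMAS AND PROOFS =====

def isSp (s : String) : Bool := s == " "
def notSp (s : String) : Bool := !(s == " ")

-- cited by cleanL's decreasing_by
theorem dropWhile_head_not {α : Type} (p : α → Bool) (l : List α) (a : α) (t : List α)
    (h : l.dropWhile p = a :: t) : p a = false := by
  induction l with
  | nil => simp at h
  | cons x xs ih =>
    by_cases px : p x = true
    · exact ih (by simpa [List.dropWhile_cons, px] using h)
    · simp only [List.dropWhile_cons] at h
      rw [if_neg px] at h
      obtain ⟨rfl, rfl⟩ := List.cons.injEq .. ▸ h
      simpa using px

-- cited by cleanL's decreasing_by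
theorem cleanL_dec (l : List String) (h : ¬ l.dropWhile isSp = []) :
    (((l.dropWhile isSp).dropWhile notSp).dropWhile isSp).length < l.length := by
  obtain ⟨a, t, hat⟩ := List.exists_cons_of_ne_nil h
  have ha : isSp a = false := dropWhile_head_not isSp l a t hat
  have hna : notSp a = true := by unfold notSp; unfold isSp at ha; simp [ha]
  have h1 := List.length_dropWhile_le isSp l
  rw [hat] at h1 ⊢
  simp only [List.dropWhile_cons, hna, if_pos]
  have h2 := List.length_dropWhile_le isSp (t.dropWhile notSp)
  have h3 := List.length_dropWhile_le notSp t
  simp at h1 ⊢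
  omega

-- the cleaned suffix, element-level: words of l with single " " elements between
def cleanL (l : List String) : List String :=
  let l1 := l.dropWhile isSp
  if h : l1 = [] then []
  else
    let w := l1.takeWhile notSp
    let r1 := (l1.dropWhile notSp).dropWhile isSp
    w ++ (if r1 = [] then [] else " " :: cleanL r1)
termination_by l.length
decreasing_by exact cleanL_dec l h

-- the words B's loop still has to emit, from state cur, reading l
def bwords : List String → Option String → List String
  | [], none => []
  | [], some c => [c]
  | x :: rest, cur =>
    if x = " " then
      match cur with
      | none => bwords rest none
      | some c => c :: bwords rest none
    else
      bwords rest (some (match cur with | none => x | some c => c ++ x))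

theorem alt_eq (l : List String) : ∀ (words : List String) (cur : Option String),
    pvAltLoop l words cur = words ++ bwords l cur := by
  induction l with
  | nil => intro words cur; cases cur <;> simp [pvAltLoop, bwords]
  | cons x t ih =>
    intro words cur
    by_cases hx : x = " "
    · cases cur <;> simp [pvAltLoop, bwords, hx, ih]
    · cases cur <;> simp [pvAltLoop, bwords, hx, ih]


theorem bwords_dropSp (l : List String) : bwords (l.dropWhile isSp) none = bwords l none := by
  induction l with
  | nil => rfl
  | cons x t ih =>
    by_cases hx : x = " "
    · simp [isSp, hx, bwords, ih]
    · simp [isSp, hx]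

theorem bwords_some (l : List String) : ∀ (c : String),
    (bwords l (some c)).map String.toList =
      (c.toList ++ ((l.takeWhile notSp).map String.toList).flatten)
        :: (bwords (l.dropWhile notSp) none).map String.toList := by
  induction l with
  | nil => intro c; simp [bwords]
  | cons x t ih =>
    intro c
    by_cases hx : x = " "
    · simp [bwords, hx, notSp]
    · simp only [bwords, if_neg hx, List.takeWhile_cons, List.dropWhile_cons]
      have hns : notSp x = true := by unfold notSp; simp [hx]
      rw [ih (c ++ x)]
      simp [hns, String.toList_append]

theorem join0 (xs : List (List Char)) : PySem.Chars.join [] xs = xs.flatten := by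
  induction xs with
  | nil => simp [PySem.Chars.join_nil]
  | cons p t ih =>
    cases t with
    | nil => simp [PySem.Chars.join_singleton]
    | cons q rest => rw [PySem.Chars.join_cons_cons]; simp [ih]

theorem key : ∀ (k : Nat) (l : List String), l.length ≤ k →
    PySem.Chars.join [] ((cleanL l).map String.toList) =
      PySem.Chars.join [' '] ((bwords l none).map String.toList) := by
  intro k
  induction k with
  | zero =>
    intro l hl
    have hnil : l = [] := List.eq_nil_of_length_eq_zero (by omega)
    subst hnil
    rw [cleanL]
    simp [bwords, PySem.Chars.join_nil]
  | succ k ih =>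
    intro l hl
    rw [← bwords_dropSp l, cleanL]
    by_cases h1 : l.dropWhile isSp = []
    · rw [dif_pos h1, h1]
      simp [bwords, PySem.Chars.join_nil]
    · rw [dif_neg h1]
      obtain ⟨a, t, hat⟩ := List.exists_cons_of_ne_nil h1
      have ha : isSp a = false := dropWhile_head_not isSp l a t hat
      have hne : ¬ a = " " := by unfold isSp at ha; simpa using ha
      have hna : notSp a = true := by unfold notSp; simp [hne]
      have hb1 : bwords (l.dropWhile isSp) none = bwords t (some a) := by
        rw [hat]; simp [bwords, hne]
      have hw : (l.dropWhile isSp).takeWhile notSp = a :: t.takeWhile notSp := by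
        rw [hat, List.takeWhile_cons, if_pos hna]
      have hr0 : (l.dropWhile isSp).dropWhile notSp = t.dropWhile notSp := by
        rw [hat, List.dropWhile_cons, if_pos hna]
      rw [hb1, bwords_some t a, hw, hr0, ← bwords_dropSp (t.dropWhile notSp)]
      dsimp only
      have hlen : ((t.dropWhile notSp).dropWhile isSp).length ≤ k := by
        have e1 := List.length_dropWhile_le isSp (t.dropWhile notSp)
        have e2 := List.length_dropWhile_le notSp t
        have e3 := List.length_dropWhile_le isSp l
        rw [hat] at e3
        simp only [List.length_cons] at e3
        omega
      have hsp : (" " : String).toList = [' '] := rfl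
      by_cases h2 : (t.dropWhile notSp).dropWhile isSp = []
      · rw [h2]
        simp [bwords, join0, PySem.Chars.join_singleton]
      · rw [if_neg h2]
        obtain ⟨b, u, hbu⟩ := List.exists_cons_of_ne_nil h2
        have hbns : notSp b = true := by
          have := dropWhile_head_not isSp (t.dropWhile notSp) b u hbu
          unfold isSp at this; unfold notSp; simpa using this
        have hbne : ¬ b = " " := by unfold notSp at hbns; simpa using hbns
        have hys : ((bwords ((t.dropWhile notSp).dropWhile isSp) none).map String.toList)
            = (b.toList ++ ((u.takeWhile notSp).map String.toList).flatten)
                :: (bwords (u.dropWhile notSp) none).map String.toList := by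
          rw [hbu]
          have : bwords (b :: u) none = bwords u (some b) := by simp [bwords, hbne]
          rw [this, bwords_some u b]
        rw [hys, PySem.Chars.join_cons_cons]
        have hIH := ih ((t.dropWhile notSp).dropWhile isSp) hlen
        rw [hys] at hIH
        rw [join0] at hIH ⊢
        simp only [List.map_append, List.flatten_append, List.map_cons, List.flatten_cons, hsp]
        rw [← hIH]
        simp

theorem pvSkip_spec (arr : List String) (n j : Nat) (hn : n = arr.length) (hj : j ≤ n) :
    pvSkip arr n j ≤ n ∧ arr.drop (pvSkip arr n j) = (arr.drop j).dropWhile isSp := by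
  fun_induction pvSkip arr n j with
  | case1 j h ih =>
    have hjlt : j < arr.length := hn ▸ h.1
    have hget : arr[j] = " " := by
      have := h.2; rwa [List.getD_eq_getElem arr "" hjlt] at this
    have hdj : arr.drop j = arr[j] :: arr.drop (j + 1) := List.drop_eq_getElem_cons hjlt
    have hsp : isSp arr[j] = true := by simp [isSp, hget]
    obtain ⟨ih1, ih2⟩ := ih (by omega)
    refine ⟨ih1, ?_⟩
    rw [hdj, List.dropWhile_cons, if_pos hsp, ih2]
  | case2 j h =>
    refine ⟨hj, ?_⟩
    by_cases hjn : j < n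
    · have hjlt : j < arr.length := hn ▸ hjn
      have hget : ¬ arr[j] = " " := by
        have hne : ¬ arr.getD j "" = " " := fun hc => h ⟨hjn, hc⟩
        rwa [List.getD_eq_getElem arr "" hjlt] at hne
      have hsp : isSp arr[j] = false := by simp [isSp, hget]
      rw [List.drop_eq_getElem_cons hjlt, List.dropWhile_cons, if_neg (by simp [hsp])]
    · have hje : j = n := by omega
      have : arr.drop j = [] := by rw [hje, hn]; exact List.drop_length
      simp [this]

theorem pvCopy_spec (arr : List String) (n i j : Nat) (hn : n = arr.length) (hij : i ≤ j)
    (hj : j ≤ n) :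
    (pvCopy arr n i j).2.1 = i + ((arr.drop j).takeWhile notSp).length ∧
    (pvCopy arr n i j).2.2 = j + ((arr.drop j).takeWhile notSp).length ∧
    (pvCopy arr n i j).1.length = n ∧
    (pvCopy arr n i j).1.take (i + ((arr.drop j).takeWhile notSp).length)
      = arr.take i ++ (arr.drop j).takeWhile notSp ∧
    (pvCopy arr n i j).1.drop (j + ((arr.drop j).takeWhile notSp).length)
      = arr.drop (j + ((arr.drop j).takeWhile notSp).length) := by
  fun_induction pvCopy arr n i j with
  | case1 arr i j h ih =>
    have hjlt : j < arr.length := hn ▸ h.1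
    have hilt : i < arr.length := by omega
    have hget : arr.getD j "" = arr[j] := List.getD_eq_getElem arr "" hjlt
    have hne : ¬ arr[j] = " " := by rw [hget] at h; exact h.2
    have hns : notSp arr[j] = true := by simp [notSp, hne]
    have hdj : arr.drop j = arr[j] :: arr.drop (j + 1) := List.drop_eq_getElem_cons hjlt
    have hds : (arr.set i (arr.getD j "")).drop (j + 1) = arr.drop (j + 1) :=
      List.drop_set_of_lt (by omega)
    obtain ⟨ih1, ih2, ih3, ih4, ih5⟩ :=
      ih (by rw [List.length_set]; exact hn) (by omega) (by omega)
    rw [hds] at ih1 ih2 ih4 ih5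
    have hw : (arr.drop j).takeWhile notSp = arr[j] :: (arr.drop (j + 1)).takeWhile notSp := by
      rw [hdj, List.takeWhile_cons, if_pos hns]
    have htk : (arr.set i (arr.getD j "")).take (i + 1) = arr.take i ++ [arr[j]] := by
      rw [List.set_eq_take_append_cons_drop, if_pos (by omega)]
      rw [List.take_append]
      have hlt : (arr.take i).length = i := by simp; omega
      rw [hlt]
      simp [List.take_succ_cons, show i + 1 - i = 1 by omega,
        List.getElem?_eq_getElem hjlt]
    refine ⟨by rw [ih1, hw]; simp; omega, by rw [ih2, hw]; simp; omega, ih3, ?_, ?_⟩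
    · rw [hw]
      have : i + (arr[j] :: (arr.drop (j + 1)).takeWhile notSp).length
          = i + 1 + ((arr.drop (j + 1)).takeWhile notSp).length := by simp; omega
      rw [this, ih4, htk]
      simp
    · rw [hw]
      have : j + (arr[j] :: (arr.drop (j + 1)).takeWhile notSp).length
          = j + 1 + ((arr.drop (j + 1)).takeWhile notSp).length := by simp; omega
      rw [this, ih5]
      rw [List.drop_set_of_lt (by omega)]
  | case2 arr i j h =>
    have hw : (arr.drop j).takeWhile notSp = [] := by
      by_cases hjn : j < n
      · have hjlt : j < arr.length := hn ▸ hjn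
        have hget : arr.getD j "" = arr[j] := List.getD_eq_getElem arr "" hjlt
        have heq : arr[j] = " " := by
          by_contra hc
          exact h ⟨hjn, by rw [hget]; exact hc⟩
        rw [List.drop_eq_getElem_cons hjlt, List.takeWhile_cons, if_neg (by simp [notSp, heq])]
      · have : arr.drop j = [] := by
          have : j = n := by omega
          rw [this, hn]; exact List.drop_length
        simp [this]
    simp [hw, hn]

theorem pvOuter_take : ∀ (k : Nat) (arr : List String) (n i j : Nat), n - j ≤ k →
    n = arr.length → i ≤ j → j ≤ n →
    (pvOuter arr n i j).1.take (pvOuter arr n i j).2 = arr.take i ++ cleanL (arr.drop j) := by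
  intro k
  induction k with
  | zero =>
    intro arr n i j hk hn hij hj
    have hjn : ¬ j < n := by omega
    have hde : arr.drop j = [] := by
      have hje : j = n := by omega
      rw [hje, hn]; exact List.drop_length
    rw [pvOuter, dif_neg hjn, hde]
    have hcl : cleanL [] = [] := by rw [cleanL]; simp
    simp [hcl]
  | succ k ih =>
    intro arr n i j hk hn hij hj
    by_cases hjn : j < n
    · obtain ⟨hs1a, hs1b⟩ := pvSkip_spec arr n j hn hj
      have hs1ge := pvSkip_ge arr n j
      have hij1 : i ≤ pvSkip arr n j := by omega
      obtain ⟨c1, c2, c3, c4, c5⟩ := pvCopy_spec arr n i (pvSkip arr n j) hn hij1 hs1a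
      rw [hs1b] at c1 c2 c4 c5
      -- abbreviations
      have hl1len : ((arr.drop j).dropWhile isSp).length = arr.length - pvSkip arr n j := by
        rw [← hs1b]; exact List.length_drop
      have hwle : (((arr.drop j).dropWhile isSp).takeWhile notSp).length
          ≤ ((arr.drop j).dropWhile isSp).length := (List.takeWhile_sublist _).length_le
      have hj2n : (pvCopy arr n i (pvSkip arr n j)).2.2 ≤ n := by rw [c2]; omega
      have hn2 : n = (pvCopy arr n i (pvSkip arr n j)).1.length := c3.symm
      obtain ⟨s2a, s2b⟩ := pvSkip_spec (pvCopy arr n i (pvSkip arr n j)).1 n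
        (pvCopy arr n i (pvSkip arr n j)).2.2 hn2 hj2n
      have s2ge := pvSkip_ge (pvCopy arr n i (pvSkip arr n j)).1 n
        (pvCopy arr n i (pvSkip arr n j)).2.2
      -- the suffix after the copy is the dropWhile-notSp remainder of l1
      have hr0 : arr.drop (pvSkip arr n j + (((arr.drop j).dropWhile isSp).takeWhile notSp).length)
          = ((arr.drop j).dropWhile isSp).dropWhile notSp := by
        rw [← List.drop_drop, hs1b]
        conv_lhs => rw [← List.takeWhile_append_dropWhile (p := notSp) (l := (arr.drop j).dropWhile isSp)]
        rw [List.drop_append]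
        simp
      have hcd : (pvCopy arr n i (pvSkip arr n j)).1.drop (pvCopy arr n i (pvSkip arr n j)).2.2
          = ((arr.drop j).dropWhile isSp).dropWhile notSp := by
        rw [c2, c5, hr0]
      rw [hcd] at s2b
      -- unfold one outer iteration
      rw [pvOuter, dif_pos hjn]
      simp only []
      by_cases hlt : pvSkip (pvCopy arr n i (pvSkip arr n j)).1 n
          (pvCopy arr n i (pvSkip arr n j)).2.2 < n
      · rw [if_pos hlt]
        -- r1 is nonempty, and the write position is strictly below the new j
        have hr1len : ((((arr.drop j).dropWhile isSp).dropWhile notSp).dropWhile isSp).length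
            = n - pvSkip (pvCopy arr n i (pvSkip arr n j)).1 n
                (pvCopy arr n i (pvSkip arr n j)).2.2 := by
          rw [← s2b, List.length_drop, c3]
        have hr1ne : (((arr.drop j).dropWhile isSp).dropWhile notSp).dropWhile isSp ≠ [] := by
          intro hcon
          rw [hcon] at hr1len
          simp at hr1len
          omega
        have hr0ne : ((arr.drop j).dropWhile isSp).dropWhile notSp ≠ [] := by
          intro hcon
          rw [hcon] at hr1ne
          simp at hr1ne
        obtain ⟨b, u, hbu⟩ := List.exists_cons_of_ne_nil hr0ne
        have hb : notSp b = false := dropWhile_head_not notSp _ b u hbu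
        have hbs : isSp b = true := by
          unfold notSp at hb; unfold isSp; simpa using hb
        have hstrict : (pvCopy arr n i (pvSkip arr n j)).2.2
            < pvSkip (pvCopy arr n i (pvSkip arr n j)).1 n
                (pvCopy arr n i (pvSkip arr n j)).2.2 := by
          have h1 : ((((arr.drop j).dropWhile isSp).dropWhile notSp).dropWhile isSp).length
              ≤ u.length := by
            rw [hbu, List.dropWhile_cons, if_pos hbs]
            exact List.length_dropWhile_le _ _
          have h2 : (((arr.drop j).dropWhile isSp).dropWhile notSp).length = u.length + 1 := by
            rw [hbu]; simp
          have h3 : (((arr.drop j).dropWhile isSp).dropWhile notSp).length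
              = arr.length - (pvCopy arr n i (pvSkip arr n j)).2.2 := by
            rw [← hcd, List.length_drop, c3, hn]
          omega
        have hi2 : (pvCopy arr n i (pvSkip arr n j)).2.1
            < pvSkip (pvCopy arr n i (pvSkip arr n j)).1 n
                (pvCopy arr n i (pvSkip arr n j)).2.2 := by
          omega
        -- apply the induction hypothesis to the recursive call
        have hIH := ih ((pvCopy arr n i (pvSkip arr n j)).1.set
            (pvCopy arr n i (pvSkip arr n j)).2.1 " ") n
          ((pvCopy arr n i (pvSkip arr n j)).2.1 + 1)
          (pvSkip (pvCopy arr n i (pvSkip arr n j)).1 n (pvCopy arr n i (pvSkip arr n j)).2.2)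
          (by omega)
          (by rw [List.length_set]; exact hn2) (by omega) (by omega)
        rw [hIH]
        have hdset : ((pvCopy arr n i (pvSkip arr n j)).1.set
            (pvCopy arr n i (pvSkip arr n j)).2.1 " ").drop
              (pvSkip (pvCopy arr n i (pvSkip arr n j)).1 n
                (pvCopy arr n i (pvSkip arr n j)).2.2)
            = (((arr.drop j).dropWhile isSp).dropWhile notSp).dropWhile isSp := by
          rw [List.drop_set_of_lt hi2, s2b]
        have hi2len : (pvCopy arr n i (pvSkip arr n j)).2.1
            < (pvCopy arr n i (pvSkip arr n j)).1.length := by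
          rw [c3]; omega
        have htset : ((pvCopy arr n i (pvSkip arr n j)).1.set
            (pvCopy arr n i (pvSkip arr n j)).2.1 " ").take
              ((pvCopy arr n i (pvSkip arr n j)).2.1 + 1)
            = arr.take i ++ ((arr.drop j).dropWhile isSp).takeWhile notSp ++ [" "] := by
          rw [List.set_eq_take_append_cons_drop, if_pos hi2len, List.take_append]
          have hlt2 : ((pvCopy arr n i (pvSkip arr n j)).1.take
              (pvCopy arr n i (pvSkip arr n j)).2.1).length
              = (pvCopy arr n i (pvSkip arr n j)).2.1 := by
            simp; omega
          rw [hlt2]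
          have : (pvCopy arr n i (pvSkip arr n j)).2.1 + 1
              - (pvCopy arr n i (pvSkip arr n j)).2.1 = 1 := by omega
          rw [this]
          rw [show (pvCopy arr n i (pvSkip arr n j)).1.take (pvCopy arr n i (pvSkip arr n j)).2.1
              = arr.take i ++ ((arr.drop j).dropWhile isSp).takeWhile notSp from by rw [c1]; exact c4]
          rw [List.take_of_length_le
            (by rw [c1]; simp only [List.length_append, List.length_take]; omega)]
          simp
        rw [hdset, htset]
        -- evaluate cleanL on the right-hand side
        have hl1ne : (arr.drop j).dropWhile isSp ≠ [] := by
          intro hcon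
          have : (((arr.drop j).dropWhile isSp).dropWhile notSp) = [] := by rw [hcon]; rfl
          exact hr0ne this
        conv_rhs => rw [cleanL]
        simp only [dif_neg hl1ne, if_neg hr1ne]
        simp
      · rw [if_neg hlt]
        -- the recursive call is at j = n: it returns immediately
        have hskipn : pvSkip (pvCopy arr n i (pvSkip arr n j)).1 n
            (pvCopy arr n i (pvSkip arr n j)).2.2 = n := by omega
        rw [pvOuter, dif_neg (by omega : ¬ pvSkip (pvCopy arr n i (pvSkip arr n j)).1 n
            (pvCopy arr n i (pvSkip arr n j)).2.2 < n)]
        have htake : (pvCopy arr n i (pvSkip arr n j)).1.take (pvCopy arr n i (pvSkip arr n j)).2.1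
            = arr.take i ++ ((arr.drop j).dropWhile isSp).takeWhile notSp := by
          rw [c1]; exact c4
        rw [htake]
        have hr1e : (((arr.drop j).dropWhile isSp).dropWhile notSp).dropWhile isSp = [] := by
          rw [← s2b, hskipn, List.drop_eq_nil_iff]
          omega
        by_cases hl1 : (arr.drop j).dropWhile isSp = []
        · have hwnil : ((arr.drop j).dropWhile isSp).takeWhile notSp = [] := by
            rw [hl1]; rfl
          conv_rhs => rw [cleanL]
          simp only [dif_pos hl1]
          simp [hwnil]
        · conv_rhs => rw [cleanL]
          simp only [dif_neg hl1, if_pos hr1e]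
          simp
    · have hde : arr.drop j = [] := by
        have hje : j = n := by omega
        rw [hje, hn]; exact List.drop_length
      rw [pvOuter, dif_neg hjn, hde]
      have hcl : cleanL [] = [] := by rw [cleanL]; simp
      simp [hcl]

-- ===== VERDICT (by name: the statement is the Claim_ definition above) =====
theorem clean_spaces_py_spec : Claim_equal_clean_spaces_py := by
  unfold Claim_equal_clean_spaces_py
  intro arr _
  unfold Spec_clean_spaces_py clean_spaces_py clean_spaces_py_alt
  simp only []
  rw [alt_eq arr [] none]
  simp only [List.nil_append]
  have h := pvOuter_take arr.length arr arr.length 0 0 (by omega) rfl (by omega) (by omega)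
  rw [List.take_zero, List.nil_append, List.drop_zero] at h
  rw [h]
  unfold PySem.Str.join
  apply congrArg String.ofList
  rw [show ("" : String).toList = [] from rfl, show (" " : String).toList = [' '] from rfl]
  exact key arr.length arr (le_refl _)
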